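-- pv_equiv track=rewrite | github.com/soliv36/SDR-BPSK-COMM | SDR_BPSK_/main_tx.py | str_to_binary_list
-- ===== SOURCE A (Python) =====
-- def str_to_binary_list(text):
--     index = 0
--     strings = []
--     while index < len(text):
--         strings.append(text[index])
--         index = index + 1
--
--     #convert to ascii binary
--     strings = [bin(ord(char))[2:].zfill(8) for char in strings]
--
--     #convert the list to indivdual bits
--     bits = []
--
--     for string in strings:
--         for bit in string:
--             bits.append(int(bit))
--
--     return bits
-- ===== SOURCE B (Python) =====
-- def str_to_binary_list(text):
--     bits = []
--     for char in text:
--         n = ord(char)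
--         width = max(8, n.bit_length())
--         for i in range(width - 1, -1, -1):
--             bits.append((n >> i) & 1)
--     return bits
-- ===== Notes on version B (the rewrite author's own statement) =====
-- stated objective: simpler
-- what changed: Single pass over the text extracting each bit arithmetically with shifts and masks, instead of copying characters into a list, formatting each as a zero-filled binary string, and re-parsing every digit character back to int.
import Mathlib
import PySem

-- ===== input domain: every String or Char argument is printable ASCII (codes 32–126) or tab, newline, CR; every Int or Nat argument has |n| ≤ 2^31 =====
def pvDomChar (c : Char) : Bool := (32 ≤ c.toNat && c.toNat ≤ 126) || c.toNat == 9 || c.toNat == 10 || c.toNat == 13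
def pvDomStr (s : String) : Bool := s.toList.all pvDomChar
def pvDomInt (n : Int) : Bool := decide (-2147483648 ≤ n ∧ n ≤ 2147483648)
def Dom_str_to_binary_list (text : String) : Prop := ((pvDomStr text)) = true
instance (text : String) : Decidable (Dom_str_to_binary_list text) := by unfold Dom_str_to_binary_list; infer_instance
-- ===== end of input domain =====

-- B replaces A's copy-loop + binary-string formatting + digit re-parsing by one pass
-- extracting each bit arithmetically with shifts and masks.

-- ===== PORT A =====
-- bin(ord(char))[2:].zfill(8)  (bin(n)[2:] for n ≥ 0 is format(n,'b') = PySem.Int.toBinChars)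
def pvAEncode (c : Char) : List Char :=
  PySem.Chars.zfill (PySem.Int.toBinChars (c.toNat : Int)) 8

def str_to_binary_list (text : String) : List Int :=
  -- while index < len(text): strings.append(text[index])
  let strings : List Char := text.toList.foldl (fun acc c => acc ++ [c]) []
  -- strings = [bin(ord(char))[2:].zfill(8) for char in strings]
  let strings := strings.map pvAEncode
  -- for string in strings: for bit in string: bits.append(int(bit))
  strings.foldl (fun bits s =>
    s.foldl (fun bits b => bits ++ [(PySem.Int.ofChars? [b]).getD 0]) bits) []

-- ===== PORT B =====
def str_to_binary_list_alt (text : String) : List Int :=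
  text.toList.foldl (fun bits c =>
    let n : Int := (c.toNat : Int)
    let width : Nat := max 8 (PySem.Int.bitLength n)
    (PySem.List.pyRange ((width : Int) - 1) (-1) (-1)).foldl
      (fun bits i => bits ++ [PySem.Int.band (n >>> i.toNat) 1]) bits) []

-- ===== PRECONDITION & SPEC =====
def Spec_str_to_binary_list (text : String) (out : List Int) : Prop := out = str_to_binary_list_alt text
instance (text : String) (out : List Int) : Decidable (Spec_str_to_binary_list text out) := by unfold Spec_str_to_binary_list; infer_instance

-- ===== CLAIM (what is proved, stated in full; the proofs are below) =====
def Claim_equal_str_to_binary_list : Prop := ∀ (text : String), Dom_str_to_binary_list text → Spec_str_to_binary_list text (str_to_binary_list text)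

-- ===== LEMMAS AND PROOFS =====

-- A's per-character bit list, as a function of the code point
def pvA (m : Nat) : List Int :=
  (PySem.Chars.zfill (PySem.Int.toBinChars (m : Int)) 8).map
    (fun b => (PySem.Int.ofChars? [b]).getD 0)

-- B's per-character bit list, as a function of the code point
def pvB (m : Nat) : List Int :=
  (PySem.List.pyRange ((max 8 (PySem.Int.bitLength (m : Int)) : Nat) - 1) (-1) (-1)).map
    (fun i => PySem.Int.band ((m : Int) >>> i.toNat) 1)

lemma pvAB : ∀ m < 128, pvA m = pvB m := by decide

lemma A_flat (text : String) :
    str_to_binary_list text = text.toList.flatMap (fun c => pvA c.toNat) := by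
  unfold str_to_binary_list
  simp only [PySem.List.foldl_append_singleton, List.nil_append,
    PySem.List.foldl_append_singleton_eq_map,
    PySem.List.foldl_append_eq_flatMap, List.flatMap_map]
  rfl

lemma B_flat (text : String) :
    str_to_binary_list_alt text = text.toList.flatMap (fun c => pvB c.toNat) := by
  unfold str_to_binary_list_alt
  simp only [PySem.List.foldl_append_singleton_eq_map,
    PySem.List.foldl_append_eq_flatMap, List.nil_append]
  rfl

lemma flat_congr (l : List Char) (h : l.all pvDomChar = true) :
    l.flatMap (fun c => pvA c.toNat) = l.flatMap (fun c => pvB c.toNat) := by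
  induction l with
  | nil => rfl
  | cons c t ih =>
    simp only [List.all_cons, Bool.and_eq_true] at h
    have hc : c.toNat < 128 := by
      have := h.1; unfold pvDomChar at this; simp at this; omega
    simp only [List.flatMap_cons, ih h.2, pvAB c.toNat hc]

-- ===== VERDICT (by name: the statement is the Claim_ definition above) =====
theorem str_to_binary_list_spec : Claim_equal_str_to_binary_list := by
  intro text hdom
  unfold Spec_str_to_binary_list
  rw [A_flat, B_flat]
  exact flat_congr _ hdom
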